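-- pv_equiv track=rewrite | github.com/Primero1800/internet_store | mine_shop/posts/inner_functions.py | correct_by_word_length
-- ===== SOURCE A (Python) =====
-- def correct_by_word_length(text, l):
--     words = text.strip().split()
--     result = []
--     for word in words:
--         if len(word) > l:
--             i = l
--             while i < len(word):
--                 word=word[:i]+'\n'+word[i:]
--                 i += l + 1
--         result.append(word)
--     return ' '.join(result)
-- ===== SOURCE B (Python) =====
-- def correct_by_word_length(text, l):
--     return ' '.join(
--         '\n'.join(w[i:i+l] for i in range(0, len(w), l))
--         for w in text.split()
--     )
-- ===== Notes on version B (the rewrite author's own statement) =====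
-- stated objective: idiomatic
-- what changed: A repeatedly re-splices each long word in place (word = word[:i]+'\n'+word[i:]) while advancing a shifting index; B instead slices each word into fixed-size chunks over range(0, len(w), l) and joins the chunks with newlines, with no mutation or index arithmetic.
-- outside the precondition, e.g. on correct_by_word_length('abc', 0): A does not finish within the time limit, B raises ValueError
import Mathlib
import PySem

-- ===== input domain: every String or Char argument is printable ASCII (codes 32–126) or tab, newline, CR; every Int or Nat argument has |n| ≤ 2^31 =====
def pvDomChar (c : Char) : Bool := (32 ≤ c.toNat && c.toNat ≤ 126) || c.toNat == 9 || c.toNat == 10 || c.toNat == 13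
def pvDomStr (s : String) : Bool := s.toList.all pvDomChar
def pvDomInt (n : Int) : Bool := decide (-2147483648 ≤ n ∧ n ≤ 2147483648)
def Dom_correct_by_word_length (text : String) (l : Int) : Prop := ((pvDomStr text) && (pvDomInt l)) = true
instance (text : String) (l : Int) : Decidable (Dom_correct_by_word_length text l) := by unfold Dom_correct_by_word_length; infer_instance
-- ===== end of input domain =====

-- B replaces A's in-place newline-splicing while loop by joining fixed-size slices taken over a stride range (simpler/idiomatic; no speed claim).

-- ===== PORT A =====
-- the while loop 'while i < len(word): word = word[:i]+'\n'+word[i:]; i += l+1';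
-- fuel (= the word's length) only totalizes it: for l ≥ 1 it is never exhausted,
-- and Pre_ excludes exactly the inputs where the Python loop would not terminate.
def pvInsertLoop (l : Int) (fuel : Nat) (word : List Char) (i : Int) : List Char :=
  match fuel with
  | 0 => word
  | fuel + 1 =>
    if i < (word.length : Int) then
      pvInsertLoop l fuel
        (PySem.List.slice word none (some i) ++ '\n' :: PySem.List.slice word (some i) none)
        (i + (l + 1))
    else word

def correct_by_word_length (text : String) (l : Int) : String :=
  let words := PySem.Str.split₀ (PySem.Str.strip text)
  let result := words.foldl
    (fun result word =>
      result ++ [if PySem.Str.len word > l then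
                   String.ofList (pvInsertLoop l word.toList.length word.toList l)
                 else word]) []
  PySem.Str.join " " result

-- ===== PORT B =====
def correct_by_word_length_alt (text : String) (l : Int) : String :=
  PySem.Str.join " "
    ((PySem.Str.split₀ text).map (fun w =>
      PySem.Str.join "\n"
        ((PySem.List.pyRange 0 (PySem.Str.len w) l).map
          (fun i => String.ofList (PySem.List.slice w.toList (some i) (some (i + l)))))))

-- ===== PRECONDITION & SPEC =====
-- Pre_ excludes l ≤ 0 on texts containing a non-whitespace character: there A's while
-- loop never terminates (every word has length > l, and i advances by l+1 ≤ 1 more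
-- slowly than the word grows), so A returns on exactly the inputs Pre_ admits.
def Pre_correct_by_word_length (text : String) (l : Int) : Prop :=
  1 ≤ l ∨ text.toList.all PySem.Chars.isspace = true
instance (text : String) (l : Int) : Decidable (Pre_correct_by_word_length text l) := by
  unfold Pre_correct_by_word_length; infer_instance

def pvWitness_correct_by_word_length : String × Int := ("hello world, friends", 3)

def Spec_correct_by_word_length (text : String) (l : Int) (out : String) : Prop := out = correct_by_word_length_alt text l
instance (text : String) (l : Int) (out : String) : Decidable (Spec_correct_by_word_length text l out) := by unfold Spec_correct_by_word_length; infer_instance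

-- ===== CLAIM (what is proved, stated in full; the proofs are below) =====
def Claim_equal_correct_by_word_length : Prop := ∀ (text : String) (l : Int), Dom_correct_by_word_length text l → Pre_correct_by_word_length text l → Spec_correct_by_word_length text l (correct_by_word_length text l)

-- ===== LEMMAS AND PROOFS =====

-- the common shape both per-word computations reach: chunks of size l joined by '\n'
def chunksJoin (l : Nat) (cs : List Char) : List Char :=
  if cs.length ≤ l ∨ l = 0 then cs
  else cs.take l ++ '\n' :: chunksJoin l (cs.drop l)
termination_by cs.length
decreasing_by simp only [List.length_drop]; omega

theorem chunksJoin_of_le {l : Nat} {cs : List Char} (h : cs.length ≤ l) :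
    chunksJoin l cs = cs := by rw [chunksJoin]; simp [h]

theorem chunksJoin_of_lt {l : Nat} {cs : List Char} (h1 : 0 < l) (h2 : l < cs.length) :
    chunksJoin l cs = cs.take l ++ '\n' :: chunksJoin l (cs.drop l) := by
  rw [chunksJoin]; rw [if_neg (by omega)]

-- ---- A side: the splice loop produces chunksJoin ----
theorem pvInsertLoop_eq (l : Int) (hl : 1 ≤ l) :
    ∀ (fuel : Nat) (w p : List Char), w.length ≤ fuel →
      pvInsertLoop l fuel (p ++ w) ((p.length : Int) + l) = p ++ chunksJoin l.toNat w := by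
  intro fuel
  induction fuel with
  | zero =>
    intro w p hw
    have : w = [] := List.length_eq_zero_iff.mp (by omega)
    subst this
    rw [chunksJoin_of_le (by simp)]
    simp [pvInsertLoop]
  | succ fuel ih =>
    intro w p hw
    rw [pvInsertLoop]
    by_cases hc : (p.length : Int) + l < ((p ++ w).length : Int)
    · rw [if_pos hc]
      have hwl : l < (w.length : Int) := by simp at hc; omega
      have hi0 : (0 : Int) ≤ (p.length : Int) + l := by omega
      have htn : ((p.length : Int) + l).toNat = p.length + l.toNat := by omega
      have hslice1 : PySem.List.slice (p ++ w) none (some ((p.length : Int) + l))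
          = p ++ w.take l.toNat := by
        rw [PySem.List.slice_to _ hi0, htn, List.take_append]
        simp
      have hslice2 : PySem.List.slice (p ++ w) (some ((p.length : Int) + l)) none
          = w.drop l.toNat := by
        rw [PySem.List.slice_from _ hi0, htn, List.drop_append]
        simp
      rw [hslice1, hslice2]
      have hrw : p ++ w.take l.toNat ++ '\n' :: w.drop l.toNat
          = (p ++ w.take l.toNat ++ ['\n']) ++ w.drop l.toNat := by simp
      have hlen : (((p ++ w.take l.toNat ++ ['\n']).length : Nat) : Int)
          = (p.length : Int) + l + 1 := by
        simp only [List.length_append, List.length_take, List.length_cons, List.length_nil]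
        omega
      have hfuel : (w.drop l.toNat).length ≤ fuel := by
        simp only [List.length_drop]; omega
      have hih := ih (w.drop l.toNat) (p ++ w.take l.toNat ++ ['\n']) hfuel
      rw [hlen] at hih
      have harg : (p.length : Int) + l + (l + 1) = (p.length : Int) + l + 1 + l := by ring
      rw [hrw, harg, hih]
      rw [chunksJoin_of_lt (cs := w) (by omega) (by omega)]
      simp
    · rw [if_neg hc]
      have : w.length ≤ l.toNat := by simp at hc; omega
      rw [chunksJoin_of_le this]

-- ---- B side: the stride range of slices produces chunksJoin ----
theorem pyRange_pos_cons {l n : Int} (hl : 0 < l) (hn : 0 < n) :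
    PySem.List.pyRange 0 n l = 0 :: (PySem.List.pyRange 0 (n - l) l).map (fun i => i + l) := by
  rw [PySem.List.pyRange_of_pos _ _ hl, PySem.List.pyRange_of_pos _ _ hl]
  have hdiv : (n - 0 + l - 1) / l = (n - 1) / l + 1 := by
    have h := Int.add_mul_ediv_right (n - 1) 1 (by omega : l ≠ 0)
    simp only [one_mul] at h
    rw [show n - 0 + l - 1 = n - 1 + l by ring, h]
  have hge : 0 ≤ (n - 1) / l := Int.ediv_nonneg (by omega) (by omega)
  rw [if_pos (by omega : (0:Int) < n), hdiv]
  have htn : ((n - 1) / l + 1).toNat = ((n - 1) / l).toNat + 1 := by omega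
  rw [htn, List.range_succ_eq_map]
  have hcount : (if (0:Int) < n - l then ((n - l - 0 + l - 1) / l).toNat else 0)
      = ((n - 1) / l).toNat := by
    by_cases h : (0:Int) < n - l
    · rw [if_pos h]; congr 2; ring
    · rw [if_neg h]
      have : (n - 1) / l = 0 := Int.ediv_eq_zero_of_lt (by omega) (by omega)
      simp [this]
  rw [hcount]
  simp only [List.map_cons, List.map_map]
  congr 1
  · simp
  · apply List.map_congr_left
    intro k _
    simp only [Function.comp]
    push_cast
    ring

theorem sliceJoin_eq (l : Int) (hl : 1 ≤ l) :
    ∀ (cs : List Char),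
      PySem.Chars.join ['\n']
        ((PySem.List.pyRange 0 (cs.length : Int) l).map
          (fun i => PySem.List.slice cs (some i) (some (i + l)))) = chunksJoin l.toNat cs := by
  intro cs
  induction hcs : cs.length using Nat.strong_induction_on generalizing cs with
  | _ n ih =>
  subst hcs
  by_cases h0 : cs.length = 0
  · have : cs = [] := List.length_eq_zero_iff.mp h0
    subst this
    simp [PySem.List.pyRange, PySem.Chars.join, chunksJoin, List.intercalate]
  · rw [pyRange_pos_cons (by omega) (by exact_mod_cast Nat.pos_of_ne_zero h0)]
    rw [List.map_cons, List.map_map]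
    have hslice0 : PySem.List.slice cs (some 0) (some (0 + l)) = cs.take l.toNat := by
      rw [PySem.List.slice_toNat _ (by omega) (by omega)]
      simp
    have hmap : ((PySem.List.pyRange 0 ((cs.length : Int) - l) l).map
        ((fun i => PySem.List.slice cs (some i) (some (i + l))) ∘ (fun i => i + l)))
        = (PySem.List.pyRange 0 (((cs.drop l.toNat).length : Nat) : Int) l).map
            (fun i => PySem.List.slice (cs.drop l.toNat) (some i) (some (i + l))) := by
      by_cases hlen : l < (cs.length : Int)
      · have hlen' : (((cs.drop l.toNat).length : Nat) : Int) = (cs.length : Int) - l := by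
          simp only [List.length_drop]; omega
        rw [hlen']
        apply List.map_congr_left
        intro i hi
        have hi0 : 0 ≤ i := ((PySem.List.mem_pyRange_iff_of_pos (by omega) i).mp hi).1
        simp only [Function.comp]
        rw [PySem.List.slice_toNat _ (by omega) (by omega),
            PySem.List.slice_toNat _ (by omega) (by omega)]
        rw [List.drop_drop]
        congr 1
        · omega
        · congr 1; omega
      · have h1 : PySem.List.pyRange 0 ((cs.length : Int) - l) l = [] := by
          rw [PySem.List.pyRange_of_pos _ _ (by omega)]
          rw [if_neg (by omega)]
          simp
        have h2 : PySem.List.pyRange 0 (((cs.drop l.toNat).length : Nat) : Int) l = [] := by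
          rw [PySem.List.pyRange_of_pos _ _ (by omega)]
          rw [if_neg (by simp only [List.length_drop]; omega)]
          simp
        rw [h1, h2]; simp
    rw [hslice0, hmap]
    by_cases hlen : l < (cs.length : Int)
    · have h0mem : (0 : Int) ∈ PySem.List.pyRange 0 (((cs.drop l.toNat).length : Nat) : Int) l :=
        (PySem.List.mem_pyRange_iff_of_pos (by omega) 0).mpr
          ⟨le_refl _, by simp only [List.length_drop]; omega, by simp⟩
      have hne : (PySem.List.pyRange 0 (((cs.drop l.toNat).length : Nat) : Int) l) ≠ [] :=
        List.ne_nil_of_mem h0mem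
      have hne2 : ((PySem.List.pyRange 0 (((cs.drop l.toNat).length : Nat) : Int) l).map
          (fun i => PySem.List.slice (cs.drop l.toNat) (some i) (some (i + l)))) ≠ [] := by
        simpa using hne
      obtain ⟨q, rest, hqr⟩ := List.exists_cons_of_ne_nil hne2
      rw [hqr, PySem.Chars.join_cons_cons, ← hqr]
      rw [ih (cs.drop l.toNat).length (by simp only [List.length_drop]; omega) (cs.drop l.toNat) rfl]
      rw [chunksJoin_of_lt (cs := cs) (by omega) (by omega)]
      simp
    · have h2 : PySem.List.pyRange 0 (((cs.drop l.toNat).length : Nat) : Int) l = [] := by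
        rw [PySem.List.pyRange_of_pos _ _ (by omega)]
        rw [if_neg (by simp only [List.length_drop]; omega)]
        simp
      rw [h2]
      simp only [List.map_nil, PySem.Chars.join_singleton]
      rw [List.take_of_length_le (by omega), chunksJoin_of_le (by omega)]

-- ---- split₀ is insensitive to strip ----
theorem go_allspace (ws : List Char) (hws : ∀ c ∈ ws, PySem.Chars.isspace c = true) :
    ∀ (cur : List Char) (acc : List (List Char)),
      PySem.Chars.split₀.go ws cur acc = PySem.Chars.split₀.go [] cur acc := by
  induction ws with
  | nil => intro cur acc; rfl
  | cons c rest ih =>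
    intro cur acc
    have hc : PySem.Chars.isspace c = true := hws c (by simp)
    have ih' := ih (fun x hx => hws x (by simp [hx]))
    by_cases hcur : cur.isEmpty
    · simp only [PySem.Chars.split₀.go, hc, hcur, if_pos]
      rw [ih' [] acc]
      simp [PySem.Chars.split₀.go]
    · simp only [PySem.Chars.split₀.go, hc, if_true]
      rw [if_neg hcur, ih' [] (cur.reverse :: acc)]
      simp only [PySem.Chars.split₀.go]
      rw [if_neg hcur]
      simp

theorem go_append_allspace (t ws : List Char) (hws : ∀ c ∈ ws, PySem.Chars.isspace c = true) :
    ∀ (cur : List Char) (acc : List (List Char)),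
      PySem.Chars.split₀.go (t ++ ws) cur acc = PySem.Chars.split₀.go t cur acc := by
  induction t with
  | nil => intro cur acc; exact go_allspace ws hws cur acc
  | cons c rest ih =>
    intro cur acc
    simp only [List.cons_append, PySem.Chars.split₀.go]
    by_cases hc : PySem.Chars.isspace c
    · rw [if_pos hc, if_pos hc]
      by_cases hcur : cur.isEmpty
      · rw [if_pos hcur, if_pos hcur, ih]
      · rw [if_neg hcur, if_neg hcur, ih]
    · rw [if_neg hc, if_neg hc, ih]

theorem go_lstrip (s : List Char) :
    ∀ (acc : List (List Char)),
      PySem.Chars.split₀.go (s.dropWhile PySem.Chars.isspace) [] acc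
        = PySem.Chars.split₀.go s [] acc := by
  induction s with
  | nil => intro acc; rfl
  | cons c rest ih =>
    intro acc
    by_cases hc : PySem.Chars.isspace c
    · rw [List.dropWhile_cons_of_pos hc, ih]
      simp [PySem.Chars.split₀.go, hc]
    · rw [List.dropWhile_cons_of_neg (by simp [hc])]

theorem split₀_strip (s : List Char) :
    PySem.Chars.split₀ (PySem.Chars.strip s) = PySem.Chars.split₀ s := by
  unfold PySem.Chars.split₀ PySem.Chars.strip PySem.Chars.rstrip
  set y := PySem.Chars.lstrip s with hy
  have hdec : (y.reverse.dropWhile PySem.Chars.isspace).reverse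
        ++ (y.reverse.takeWhile PySem.Chars.isspace).reverse = y := by
    rw [← List.reverse_append, List.takeWhile_append_dropWhile, List.reverse_reverse]
  have hws : ∀ c ∈ (y.reverse.takeWhile PySem.Chars.isspace).reverse,
      PySem.Chars.isspace c = true := by
    intro c hc
    exact List.mem_takeWhile_imp (List.mem_reverse.mp hc)
  calc PySem.Chars.split₀.go (y.reverse.dropWhile PySem.Chars.isspace).reverse [] []
      = PySem.Chars.split₀.go ((y.reverse.dropWhile PySem.Chars.isspace).reverse
          ++ (y.reverse.takeWhile PySem.Chars.isspace).reverse) [] [] :=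
        (go_append_allspace _ _ hws [] []).symm
    _ = PySem.Chars.split₀.go y [] [] := by rw [hdec]
    _ = PySem.Chars.split₀.go s [] [] := by rw [hy]; exact go_lstrip s []

theorem split₀_allspace (s : List Char) (hs : ∀ c ∈ s, PySem.Chars.isspace c = true) :
    PySem.Chars.split₀ s = [] := by
  unfold PySem.Chars.split₀
  rw [go_allspace s hs [] []]
  rfl

-- ---- the append-fold is a map ----
theorem foldl_append_singleton (g : String → String) :
    ∀ (ws : List String) (acc : List String),
      ws.foldl (fun r w => r ++ [g w]) acc = acc ++ ws.map g := by
  intro ws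
  induction ws with
  | nil => intro acc; simp
  | cons w rest ih => intro acc; simp [ih]

-- ---- per-word agreement ----
theorem word_eq (l : Int) (hl : 1 ≤ l) (w : String) :
    (if PySem.Str.len w > l then
        String.ofList (pvInsertLoop l w.toList.length w.toList l)
      else w)
    = PySem.Str.join "\n"
        ((PySem.List.pyRange 0 (PySem.Str.len w) l).map
          (fun i => String.ofList (PySem.List.slice w.toList (some i) (some (i + l))))) := by
  apply String.toList_inj.mp
  have hrhs : (PySem.Str.join "\n"
      ((PySem.List.pyRange 0 (PySem.Str.len w) l).map
        (fun i => String.ofList (PySem.List.slice w.toList (some i) (some (i + l)))))).toList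
      = chunksJoin l.toNat w.toList := by
    rw [PySem.Str.toList_join]
    rw [← sliceJoin_eq l hl w.toList]
    have hlenw : PySem.Str.len w = ((w.toList.length : Nat) : Int) := by
      simp [PySem.Str.len]
    rw [hlenw]
    congr 1
    rw [List.map_map]
    apply List.map_congr_left
    intro i _
    simp [Function.comp]
  rw [hrhs]
  by_cases hlt : PySem.Str.len w > l
  · rw [if_pos hlt]
    rw [String.toList_ofList]
    have := pvInsertLoop_eq l hl w.toList.length w.toList [] le_rfl
    simp only [List.nil_append, List.length_nil, Nat.cast_zero, zero_add] at this
    exact this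
  · rw [if_neg hlt]
    have hle : w.toList.length ≤ l.toNat := by
      simp only [PySem.Str.len, gt_iff_lt, not_lt] at hlt ⊢
      omega
    rw [chunksJoin_of_le hle]

-- ===== VERDICT (by name: the statement is the Claim_ definition above) =====
theorem correct_by_word_length_spec : Claim_equal_correct_by_word_length := by
  intro text l _hdom hpre
  unfold Spec_correct_by_word_length correct_by_word_length correct_by_word_length_alt
  by_cases hl : 1 ≤ l
  · have hwords : PySem.Str.split₀ (PySem.Str.strip text) = PySem.Str.split₀ text := by
      apply List.map_injective_iff.mpr (fun a b h => String.toList_inj.mp h)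
      rw [PySem.Str.split₀_map_toList, PySem.Str.split₀_map_toList,
          PySem.Str.toList_strip, split₀_strip]
    simp only [hwords, foldl_append_singleton]
    rw [List.nil_append]
    congr 1
    apply List.map_congr_left
    intro w _
    exact word_eq l hl w
  · have hsp : text.toList.all PySem.Chars.isspace = true := by
      rcases hpre with h | h
      · omega
      · exact h
    have hsplit : PySem.Str.split₀ text = [] := by
      apply List.map_eq_nil_iff.mp
      rw [PySem.Str.split₀_map_toList]
      exact split₀_allspace _ (by simpa [List.all_eq_true] using hsp)
    have hsplit' : PySem.Str.split₀ (PySem.Str.strip text) = [] := by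
      apply List.map_eq_nil_iff.mp
      rw [PySem.Str.split₀_map_toList, PySem.Str.toList_strip, split₀_strip]
      exact split₀_allspace _ (by simpa [List.all_eq_true] using hsp)
    simp [hsplit, hsplit']
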